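-- pv_equiv track=rewrite | github.com/senthxu-a11y/LTCLaw2.0 | src/ltclaw_gy_x/game/knowledge_rag_context.py | _group_allowed_refs_by_artifact
-- ===== SOURCE A (Python) =====
-- _ARTIFACT_BY_REF_PREFIX = {
--     'table': 'table_schema',
--     'doc': 'doc_knowledge',
--     'script': 'script_evidence',
-- }
--
-- def _group_allowed_refs_by_artifact(allowed_refs: list[str]) -> dict[str, set[str]]:
--     grouped = {
--         'table_schema': set(),
--         'doc_knowledge': set(),
--         'script_evidence': set(),
--     }
--     for ref in allowed_refs:
--         prefix, _, _tail = str(ref).partition(':')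
--         artifact_key = _ARTIFACT_BY_REF_PREFIX.get(prefix)
--         if artifact_key is not None:
--             grouped[artifact_key].add(ref)
--     return grouped
-- ===== SOURCE B (Python) =====
-- _ARTIFACT_BY_REF_PREFIX = {
--     'table': 'table_schema',
--     'doc': 'doc_knowledge',
--     'script': 'script_evidence',
-- }
--
--
-- def _group_allowed_refs_by_artifact(allowed_refs: list[str]) -> dict[str, set[str]]:
--     prefix_by_artifact = {v: k for k, v in _ARTIFACT_BY_REF_PREFIX.items()}
--     return {
--         artifact_key: {ref for ref in allowed_refs
--                        if str(ref).partition(':')[0] == prefix}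
--         for artifact_key, prefix in prefix_by_artifact.items()
--     }
-- ===== Notes on version B (the rewrite author's own statement) =====
-- stated objective: alternative
-- what changed: Instead of one pass that routes each ref into a pre-built dict of mutable sets, B inverts the prefix table and builds the result dict by a per-artifact set comprehension that scans allowed_refs once per category.
import Mathlib
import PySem

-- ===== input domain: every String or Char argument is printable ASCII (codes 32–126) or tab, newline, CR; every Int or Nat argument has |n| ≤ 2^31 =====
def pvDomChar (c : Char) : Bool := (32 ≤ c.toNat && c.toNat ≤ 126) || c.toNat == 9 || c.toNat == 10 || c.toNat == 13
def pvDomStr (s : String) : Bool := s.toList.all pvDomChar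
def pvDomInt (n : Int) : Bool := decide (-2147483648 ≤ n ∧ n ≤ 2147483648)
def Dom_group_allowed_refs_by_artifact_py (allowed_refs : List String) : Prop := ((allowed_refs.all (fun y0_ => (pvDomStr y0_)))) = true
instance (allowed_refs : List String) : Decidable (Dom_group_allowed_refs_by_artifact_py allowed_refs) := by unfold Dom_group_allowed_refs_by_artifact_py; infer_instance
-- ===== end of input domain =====

-- B replaces A's single routing pass over a dict of mutable sets by an inverted prefix
-- table and one filtering pass of allowed_refs per artifact (objective: alternative decomposition).

-- ===== PORT A =====
-- str(ref).partition(':')[0] : everything before the first ':' (the whole string if no ':').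
-- Exact: partition splits at the first occurrence of the separator.
def pvPrefixOf (s : String) : String := String.ofList (s.toList.takeWhile (fun c => c ≠ ':'))

-- _ARTIFACT_BY_REF_PREFIX.get(prefix)
def pvArtifactOf (p : String) : Option String :=
  if p = "table" then some "table_schema"
  else if p = "doc" then some "doc_knowledge"
  else if p = "script" then some "script_evidence"
  else none

-- grouped[artifact_key].add(ref); the key is always present in grouped, so Dict.modify's
-- default (never used) is Set.empty.
def pvStepA (d : PySem.Dict String (PySem.Set String)) (ref : String) :
    PySem.Dict String (PySem.Set String) :=
  match pvArtifactOf (pvPrefixOf ref) with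
  | some k => d.modify k PySem.Set.empty (fun s => PySem.Set.add s ref)
  | none => d

def group_allowed_refs_by_artifact_py (allowed_refs : List String) : List (String × List String) :=
  let grouped : PySem.Dict String (PySem.Set String) :=
    ⟨[("table_schema", PySem.Set.empty), ("doc_knowledge", PySem.Set.empty),
      ("script_evidence", PySem.Set.empty)]⟩
  (allowed_refs.foldl pvStepA grouped).items

-- ===== PORT B =====
-- {v: k for k, v in _ARTIFACT_BY_REF_PREFIX.items()}
def pvPrefixByArtifact : List (String × String) :=
  [("table_schema", "table"), ("doc_knowledge", "doc"), ("script_evidence", "script")]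

def group_allowed_refs_by_artifact_py_alt (allowed_refs : List String) : List (String × List String) :=
  pvPrefixByArtifact.map (fun kp =>
    (kp.1, PySem.Set.ofList (allowed_refs.filter (fun r => pvPrefixOf r == kp.2))))

-- ===== PRECONDITION & SPEC =====
def Spec_group_allowed_refs_by_artifact_py (allowed_refs : List String) (out : List (String × List String)) : Prop := out = group_allowed_refs_by_artifact_py_alt allowed_refs
instance (allowed_refs : List String) (out : List (String × List String)) : Decidable (Spec_group_allowed_refs_by_artifact_py allowed_refs out) := by unfold Spec_group_allowed_refs_by_artifact_py; infer_instance

-- ===== CLAIM (what is proved, stated in full; the proofs are below) =====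
def Claim_equal_group_allowed_refs_by_artifact_py : Prop := ∀ (allowed_refs : List String), Dom_group_allowed_refs_by_artifact_py allowed_refs → Spec_group_allowed_refs_by_artifact_py allowed_refs (group_allowed_refs_by_artifact_py allowed_refs)

-- ===== LEMMAS AND PROOFS =====

-- Loop invariant: A's fold over a three-key dict updates each set with exactly the
-- refs whose prefix matches that key's prefix, in order.
theorem pvLoopA (refs : List String) (s1 s2 s3 : PySem.Set String) :
    refs.foldl pvStepA ⟨[("table_schema", s1), ("doc_knowledge", s2), ("script_evidence", s3)]⟩ =
      ⟨[("table_schema", PySem.Set.update s1 (refs.filter (fun r => pvPrefixOf r == "table"))),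
        ("doc_knowledge", PySem.Set.update s2 (refs.filter (fun r => pvPrefixOf r == "doc"))),
        ("script_evidence", PySem.Set.update s3 (refs.filter (fun r => pvPrefixOf r == "script")))]⟩ := by
  induction refs generalizing s1 s2 s3 with
  | nil => simp [PySem.Set.update]
  | cons r rs ih =>
    simp only [List.foldl_cons, List.filter_cons]
    by_cases h1 : pvPrefixOf r = "table"
    · simp [pvStepA, pvArtifactOf, h1, PySem.Dict.modify, PySem.Dict.insert, PySem.Dict.getD,
        PySem.Dict.get?, ih, PySem.Set.update]
    · by_cases h2 : pvPrefixOf r = "doc"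
      · simp [pvStepA, pvArtifactOf, h2, PySem.Dict.modify, PySem.Dict.insert, PySem.Dict.getD,
          PySem.Dict.get?, ih, PySem.Set.update]
      · by_cases h3 : pvPrefixOf r = "script"
        · simp [pvStepA, pvArtifactOf, h3, PySem.Dict.modify, PySem.Dict.insert,
            PySem.Dict.getD, PySem.Dict.get?, ih, PySem.Set.update]
        · simp [pvStepA, pvArtifactOf, h1, h2, h3, ih]

-- ===== VERDICT (by name: the statement is the Claim_ definition above) =====
theorem group_allowed_refs_by_artifact_py_spec : Claim_equal_group_allowed_refs_by_artifact_py := by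
  intro allowed_refs _
  unfold Spec_group_allowed_refs_by_artifact_py
  unfold group_allowed_refs_by_artifact_py group_allowed_refs_by_artifact_py_alt pvPrefixByArtifact
  simp only []
  rw [pvLoopA]
  simp [PySem.Set.ofList_eq_foldl, PySem.Set.update, PySem.Set.empty]
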